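-- pv_equiv track=rewrite | github.com/LundiCarotte/pythoncarotte | modules/fonctions.py | creerListeBoxBrackets
-- ===== SOURCE A (Python) =====
-- def creerListeBoxBrackets(txt):
-- 	"""renvoie une liste de tupples, chaque tupple contenant les indices (dans la chaine de caractères txt) de crochets ouvrant [ et fermant ] entre lesquels il n'y a pas d'autre crochets."""
--
-- 	listeBB = []
-- 	open = False
-- 	indOpen = -1
-- 	for i in range(len(txt)):
-- 		if txt[i] == '[':
-- 			if open == False:
-- 				open = True
-- 				indOpen = i
-- 			else:
-- 				indOpen = i
-- 		if txt[i] == ']':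
-- 			if open == True:
-- 				open = False
-- 				listeBB.append((indOpen,i))
-- 	return(listeBB)
-- ===== SOURCE B (Python) =====
-- import re
--
-- def creerListeBoxBrackets(txt):
--     """renvoie la liste des paires d'indices des crochets [ ] sans autre crochet entre eux."""
--     return [(m.start(), m.end() - 1) for m in re.finditer(r'\[[^\[\]]*\]', txt)]
-- ===== Notes on version B (the rewrite author's own statement) =====
-- stated objective: idiomatic
-- what changed: Replaced the manual character loop with flag/index state by a single regex: re.finditer(r'\[[^\[\]]*\]') yields exactly the innermost bracket pairs as (m.start(), m.end()-1); same O(n) work but done by the C regex engine instead of a per-character Python loop.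
import Mathlib
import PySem

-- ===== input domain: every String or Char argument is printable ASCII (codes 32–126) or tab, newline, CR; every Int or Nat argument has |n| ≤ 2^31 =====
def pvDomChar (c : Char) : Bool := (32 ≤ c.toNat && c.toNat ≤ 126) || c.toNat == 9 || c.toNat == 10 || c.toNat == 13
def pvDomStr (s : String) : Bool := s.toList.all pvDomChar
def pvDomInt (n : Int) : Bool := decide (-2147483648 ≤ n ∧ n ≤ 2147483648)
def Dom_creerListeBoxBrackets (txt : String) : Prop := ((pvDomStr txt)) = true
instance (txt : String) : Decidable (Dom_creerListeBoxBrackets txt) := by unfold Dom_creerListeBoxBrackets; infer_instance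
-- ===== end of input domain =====

-- B replaces A's manual flag-and-index scan by a single regex (re.finditer of r'\[[^\[\]]*\]'),
-- which matches exactly the innermost bracket pairs; objective: idiomatic.


-- ===== PORT A =====
-- A: one pass over range(len(txt)) with state (open, indOpen, listeBB); 'for i in range(len(txt)): txt[i]'
-- is rendered as a fold over the indexed characters (PySem.List.enumerate), the same indices and values.
def pvStepA (st : Bool × Int × List (Int × Int)) (ic : Int × Char) : Bool × Int × List (Int × Int) :=
  -- if txt[i] == '[': open := True; indOpen := i   (both branches of A set indOpen := i)
  let p : Bool × Int := if ic.2 = '[' then (true, ic.1) else (st.1, st.2.1)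
  -- if txt[i] == ']': if open: open := False; listeBB.append((indOpen, i))
  if ic.2 = ']' && p.1 then (false, p.2, st.2.2 ++ [(p.2, ic.1)])
  else (p.1, p.2, st.2.2)

def creerListeBoxBrackets (txt : String) : List (Int × Int) :=
  ((PySem.List.enumerate txt.toList 0).foldl pvStepA
    (false, (-1 : Int), ([] : List (Int × Int)))).2.2

-- ===== PORT B =====
-- Hand port of re.finditer(r'\[[^\[\]]*\]', txt): pvScan looks for an opening '[' at each index;
-- pvMatch then consumes non-bracket characters, emits (start, i) on ']' and resumes after it,
-- and restarts the match at an inner '['. Exact for this pattern (finditer is non-overlapping,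
-- left to right); no regex engine exists in PySem so this is a step-for-step manual port.
mutual
def pvScan : Int → List Char → List (Int × Int)
  | _, [] => []
  | i, c :: cs => if c = '[' then pvMatch i (i + 1) cs else pvScan (i + 1) cs
def pvMatch : Int → Int → List Char → List (Int × Int)
  | _, _, [] => []
  | st, i, c :: cs =>
    if c = ']' then (st, i) :: pvScan (i + 1) cs
    else if c = '[' then pvMatch i (i + 1) cs
    else pvMatch st (i + 1) cs
end

def creerListeBoxBrackets_alt (txt : String) : List (Int × Int) :=
  pvScan 0 txt.toList

-- ===== PRECONDITION & SPEC =====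
def Spec_creerListeBoxBrackets (txt : String) (out : List (Int × Int)) : Prop := out = creerListeBoxBrackets_alt txt
instance (txt : String) (out : List (Int × Int)) : Decidable (Spec_creerListeBoxBrackets txt out) := by unfold Spec_creerListeBoxBrackets; infer_instance

-- ===== CLAIM (what is proved, stated in full; the proofs are below) =====
def Claim_equal_creerListeBoxBrackets : Prop := ∀ (txt : String), Dom_creerListeBoxBrackets txt → Spec_creerListeBoxBrackets txt (creerListeBoxBrackets txt)

-- ===== LEMMAS AND PROOFS =====

-- A's loop body re-stated as a structural recursion producing only the pairs it appends.
def pvLoopA : Int → Bool → Int → List Char → List (Int × Int)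
  | _, _, _, [] => []
  | i, op, ind, c :: cs =>
    let p : Bool × Int := if c = '[' then (true, i) else (op, ind)
    if c = ']' && p.1 then (p.2, i) :: pvLoopA (i + 1) false p.2 cs
    else pvLoopA (i + 1) p.1 p.2 cs

-- A's fold equals the accumulator followed by pvLoopA.
theorem pvFold_eq (cs : List Char) : ∀ (i : Int) (op : Bool) (ind : Int) (acc : List (Int × Int)),
    ((PySem.List.enumerate cs i).foldl pvStepA (op, ind, acc)).2.2 = acc ++ pvLoopA i op ind cs := by
  induction cs with
  | nil => intro i op ind acc; simp [PySem.List.enumerate_nil, pvLoopA]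
  | cons c cs ih =>
    intro i op ind acc
    rw [PySem.List.enumerate_cons, List.foldl_cons]
    by_cases h1 : c = '['
    · rw [show pvStepA (op, ind, acc) (i, c) = (true, i, acc) by simp [pvStepA, h1], ih]
      simp [pvLoopA, h1]
    · by_cases h2 : c = ']'
      · cases op with
        | false =>
          rw [show pvStepA (false, ind, acc) (i, c) = (false, ind, acc) by simp [pvStepA, h2], ih]
          simp [pvLoopA, h2]
        | true =>
          rw [show pvStepA (true, ind, acc) (i, c) = (false, ind, acc ++ [(ind, i)]) by
                simp [pvStepA, h2], ih]
          simp [pvLoopA, h2]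
      · rw [show pvStepA (op, ind, acc) (i, c) = (op, ind, acc) by simp [pvStepA, h1, h2], ih]
        simp [pvLoopA, h1, h2]

-- A's automaton agrees with B's matcher: closed state ↔ pvScan, open state ↔ pvMatch.
theorem pvLoopA_eq (cs : List Char) : ∀ (i : Int),
    (∀ ind, pvLoopA i false ind cs = pvScan i cs) ∧
    (∀ st, pvLoopA i true st cs = pvMatch st i cs) := by
  induction cs with
  | nil => intro i; exact ⟨fun _ => rfl, fun _ => rfl⟩
  | cons c cs ih =>
    intro i
    constructor
    · intro ind
      by_cases h1 : c = '['
      · simp [pvLoopA, pvScan, h1, (ih (i + 1)).2]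
      · by_cases h2 : c = ']'
        · simp [pvLoopA, pvScan, h2, (ih (i + 1)).1]
        · simp [pvLoopA, pvScan, h1, h2, (ih (i + 1)).1]
    · intro st
      by_cases h1 : c = '['
      · simp [pvLoopA, pvMatch, h1, (ih (i + 1)).2]
      · by_cases h2 : c = ']'
        · simp [pvLoopA, pvMatch, h2, (ih (i + 1)).1]
        · simp [pvLoopA, pvMatch, h1, h2, (ih (i + 1)).2]

-- ===== VERDICT (by name: the statement is the Claim_ definition above) =====
theorem creerListeBoxBrackets_spec : Claim_equal_creerListeBoxBrackets := by
  intro txt _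
  unfold Spec_creerListeBoxBrackets creerListeBoxBrackets creerListeBoxBrackets_alt
  rw [pvFold_eq]
  simp [(pvLoopA_eq txt.toList 0).1]
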